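-- pv_equiv track=rewrite | github.com/aashishravindran/agentic-fitness-app | agents/workers.py | _fatigue_keys_for_workout
-- ===== SOURCE A (Python) =====
-- from typing import Dict, List, Optional
--
-- def _fatigue_keys_for_workout(daily_workout: Dict) -> List[str]:
--     """
--     Return the fatigue_scores keys to increment for this workout's focus.
--     Used to apply +0.5 automatically when a worker completes a session.
--     """
--     keys: List[str] = []
--     focus_area = (daily_workout.get("focus_area") or "").lower()
--     focus_system = (daily_workout.get("focus_system") or "").lower()
--     focus_attribute = (daily_workout.get("focus_attribute") or "").lower()
--
--     if focus_area:
--         if "leg" in focus_area or "squat" in focus_area or "deadlift" in focus_area: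
--             keys.append("legs")
--         if "push" in focus_area or "chest" in focus_area or "press" in focus_area:
--             keys.append("push")
--         if "pull" in focus_area or "back" in focus_area or "row" in focus_area:
--             keys.append("pull")
--         if "spine" in focus_area or "back" in focus_area:
--             keys.append("spine")
--         if "hip" in focus_area:
--             keys.append("hips")
--         if "shoulder" in focus_area:
--             keys.append("shoulders")
--     if focus_system:
--         if "cardio" in focus_system or "metabolic" in focus_system:
--             keys.append("cardio")
--         if "cns" in focus_system:
--             keys.append("cns")
--     if focus_attribute:
--         if "coordination" in focus_attribute:
--             keys.append("coordination")
--         if "speed" in focus_attribute or "power" in focus_attribute: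
--             keys.append("speed")
--         if "endurance" in focus_attribute:
--             keys.append("endurance")
--
--     # Deduplicate while preserving order; if nothing matched, default to one key by workout type
--     seen = set()
--     out = []
--     for k in keys:
--         if k not in seen:
--             seen.add(k)
--             out.append(k)
--     if not out and focus_area:
--         out = ["legs" if "leg" in focus_area else "push" if "push" in focus_area else "pull"]
--     if not out and focus_system:
--         out = ["cardio"]
--     if not out and focus_attribute:
--         out = ["coordination"]
--     return out[:1]  # Single primary key: +0.5 for that group (per spec)
-- ===== SOURCE B (Python) =====
-- def _fatigue_keys_for_workout(daily_workout):
--     """Single priority-ordered rule table scanned for the first match, instead of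
--     accumulate + dedup + slice."""
--     focus_area = (daily_workout.get("focus_area") or "").lower()
--     focus_system = (daily_workout.get("focus_system") or "").lower()
--     focus_attribute = (daily_workout.get("focus_attribute") or "").lower()
--     rules = [
--         (focus_area, ("leg", "squat", "deadlift"), "legs"),
--         (focus_area, ("push", "chest", "press"), "push"),
--         (focus_area, ("pull", "back", "row"), "pull"),
--         (focus_area, ("spine", "back"), "spine"),
--         (focus_area, ("hip",), "hips"),
--         (focus_area, ("shoulder",), "shoulders"),
--         (focus_system, ("cardio", "metabolic"), "cardio"),
--         (focus_system, ("cns",), "cns"),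
--         (focus_attribute, ("coordination",), "coordination"),
--         (focus_attribute, ("speed", "power"), "speed"),
--         (focus_attribute, ("endurance",), "endurance"),
--     ]
--     for field, subs, key in rules:
--         if field and any(sub in field for sub in subs):
--             return [key]
--     # no substring matched: A's per-field defaults (its area ternary falls through to "pull")
--     if focus_area:
--         return ["pull"]
--     if focus_system:
--         return ["cardio"]
--     if focus_attribute:
--         return ["coordination"]
--     return []
-- ===== Notes on version B (the rewrite author's own statement) =====
-- stated objective: simpler
-- what changed: Replaces the accumulate-all-matches / seen-set dedup / slice-to-one pipeline with a single priority-ordered rule table scanned once, returning the first matching key directly (falling back per field when nothing matches).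
import Mathlib
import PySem

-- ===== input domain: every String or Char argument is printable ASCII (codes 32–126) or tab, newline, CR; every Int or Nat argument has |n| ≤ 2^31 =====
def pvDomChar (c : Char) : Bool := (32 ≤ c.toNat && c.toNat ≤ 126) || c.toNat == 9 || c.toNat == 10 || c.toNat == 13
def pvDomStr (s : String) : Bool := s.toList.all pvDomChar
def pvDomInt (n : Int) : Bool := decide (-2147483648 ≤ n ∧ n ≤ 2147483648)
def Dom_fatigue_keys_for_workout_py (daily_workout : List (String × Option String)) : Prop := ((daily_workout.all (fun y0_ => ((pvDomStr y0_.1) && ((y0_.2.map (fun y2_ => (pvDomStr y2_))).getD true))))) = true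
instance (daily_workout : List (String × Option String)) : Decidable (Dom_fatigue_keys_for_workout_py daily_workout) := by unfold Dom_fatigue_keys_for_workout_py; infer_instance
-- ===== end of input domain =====

-- B replaces A's accumulate/dedup/slice pipeline with one priority-ordered rule table
-- scanned for the first match (objective: simpler). Return value only; no mutation.

-- shared helper: (daily_workout.get(k) or "").lower()  (both Pythons compute the fields this way)
def pvFocus (d : List (String × Option String)) (k : String) : String :=
  match (PySem.Dict.mk d).get? k with
  | some (some s) => PySem.Str.lower s
  | _ => ""

-- ===== PORT A =====
-- the manual "seen"-set dedup loop of A, literally (seen.add + out.append)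
def pvDedupLoop : List String → PySem.Set String → List String → List String
  | [], _, out => out
  | k :: ks, seen, out =>
      if PySem.Set.contains seen k then pvDedupLoop ks seen out
      else pvDedupLoop ks (PySem.Set.add seen k) (out ++ [k])

def fatigue_keys_for_workout_py (daily_workout : List (String × Option String)) : List String :=
  let focus_area := pvFocus daily_workout "focus_area"
  let focus_system := pvFocus daily_workout "focus_system"
  let focus_attribute := pvFocus daily_workout "focus_attribute"
  let keys : List String :=
    (if focus_area ≠ "" then
      (if PySem.Str.isIn "leg" focus_area || PySem.Str.isIn "squat" focus_area || PySem.Str.isIn "deadlift" focus_area then ["legs"] else []) ++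
      (if PySem.Str.isIn "push" focus_area || PySem.Str.isIn "chest" focus_area || PySem.Str.isIn "press" focus_area then ["push"] else []) ++
      (if PySem.Str.isIn "pull" focus_area || PySem.Str.isIn "back" focus_area || PySem.Str.isIn "row" focus_area then ["pull"] else []) ++
      (if PySem.Str.isIn "spine" focus_area || PySem.Str.isIn "back" focus_area then ["spine"] else []) ++
      (if PySem.Str.isIn "hip" focus_area then ["hips"] else []) ++
      (if PySem.Str.isIn "shoulder" focus_area then ["shoulders"] else [])
     else []) ++
    (if focus_system ≠ "" then
      (if PySem.Str.isIn "cardio" focus_system || PySem.Str.isIn "metabolic" focus_system then ["cardio"] else []) ++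
      (if PySem.Str.isIn "cns" focus_system then ["cns"] else [])
     else []) ++
    (if focus_attribute ≠ "" then
      (if PySem.Str.isIn "coordination" focus_attribute then ["coordination"] else []) ++
      (if PySem.Str.isIn "speed" focus_attribute || PySem.Str.isIn "power" focus_attribute then ["speed"] else []) ++
      (if PySem.Str.isIn "endurance" focus_attribute then ["endurance"] else [])
     else [])
  let out := pvDedupLoop keys PySem.Set.empty []
  let out := if out.isEmpty && focus_area ≠ "" then
      [if PySem.Str.isIn "leg" focus_area then "legs"
       else if PySem.Str.isIn "push" focus_area then "push" else "pull"]
    else out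
  let out := if out.isEmpty && focus_system ≠ "" then ["cardio"] else out
  let out := if out.isEmpty && focus_attribute ≠ "" then ["coordination"] else out
  PySem.List.slice out none (some 1)

-- ===== PORT B =====
-- 'for field, subs, key in rules: if field and any(sub in field for sub in subs): return [key]'
def pvFirstMatch : List (String × List String × String) → Option String
  | [] => none
  | (field, subs, key) :: rest =>
      if field ≠ "" && subs.any (fun sub => PySem.Str.isIn sub field) then some key
      else pvFirstMatch rest

def fatigue_keys_for_workout_py_alt (daily_workout : List (String × Option String)) : List String :=
  let focus_area := pvFocus daily_workout "focus_area"
  let focus_system := pvFocus daily_workout "focus_system"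
  let focus_attribute := pvFocus daily_workout "focus_attribute"
  let rules : List (String × List String × String) :=
    [ (focus_area, ["leg", "squat", "deadlift"], "legs"),
      (focus_area, ["push", "chest", "press"], "push"),
      (focus_area, ["pull", "back", "row"], "pull"),
      (focus_area, ["spine", "back"], "spine"),
      (focus_area, ["hip"], "hips"),
      (focus_area, ["shoulder"], "shoulders"),
      (focus_system, ["cardio", "metabolic"], "cardio"),
      (focus_system, ["cns"], "cns"),
      (focus_attribute, ["coordination"], "coordination"),
      (focus_attribute, ["speed", "power"], "speed"),
      (focus_attribute, ["endurance"], "endurance") ]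
  match pvFirstMatch rules with
  | some key => [key]
  | none =>
      if focus_area ≠ "" then ["pull"]
      else if focus_system ≠ "" then ["cardio"]
      else if focus_attribute ≠ "" then ["coordination"]
      else []

-- ===== PRECONDITION & SPEC =====
def Spec_fatigue_keys_for_workout_py (daily_workout : List (String × Option String)) (out : List String) : Prop := out = fatigue_keys_for_workout_py_alt daily_workout
instance (daily_workout : List (String × Option String)) (out : List String) : Decidable (Spec_fatigue_keys_for_workout_py daily_workout out) := by unfold Spec_fatigue_keys_for_workout_py; infer_instance

-- ===== CLAIM (what is proved, stated in full; the proofs are below) =====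
def Claim_equal_fatigue_keys_for_workout_py : Prop := ∀ (daily_workout : List (String × Option String)), Dom_fatigue_keys_for_workout_py daily_workout → Spec_fatigue_keys_for_workout_py daily_workout (fatigue_keys_for_workout_py daily_workout)

-- ===== LEMMAS AND PROOFS =====

-- the dedup loop keeps the first element: take 1 of its result is take 1 of its input
theorem pvDedupLoop_take_one_acc (ks : List String) :
    ∀ seen out, out ≠ [] → (pvDedupLoop ks seen out).take 1 = out.take 1 := by
  induction ks with
  | nil => intro seen out _; rfl
  | cons k ks ih =>
      intro seen out h
      by_cases hm : k ∈ seen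
      · simp only [pvDedupLoop, PySem.Set.contains_eq_listContains, List.contains_iff_mem,
          decide_eq_true_eq, if_pos hm]
        exact ih _ _ h
      · have hne : out ++ [k] ≠ [] := by simp
        simp only [pvDedupLoop, PySem.Set.contains_eq_listContains, List.contains_iff_mem,
          decide_eq_true_eq, if_neg hm]
        rw [ih _ _ hne]
        cases out with
        | nil => exact absurd rfl h
        | cons a t => simp

theorem pvDedupLoop_take_one (ks : List String) :
    (pvDedupLoop ks PySem.Set.empty []).take 1 = ks.take 1 := by
  cases ks with
  | nil => rfl
  | cons k ks =>
      have : pvDedupLoop (k :: ks) PySem.Set.empty [] =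
          pvDedupLoop ks (PySem.Set.add PySem.Set.empty k) [k] := by
        simp [pvDedupLoop, PySem.Set.contains, PySem.Set.empty]
      rw [this, pvDedupLoop_take_one_acc ks _ [k] (by simp)]
      simp

theorem pvDedupLoop_isEmpty (ks : List String) :
    (pvDedupLoop ks PySem.Set.empty []).isEmpty = ks.isEmpty := by
  have h := pvDedupLoop_take_one ks
  cases hk : ks with
  | nil => simp_all
  | cons a t =>
      rw [hk] at h
      cases hr : pvDedupLoop (a :: t) PySem.Set.empty [] with
      | nil => rw [hr] at h; simp at h
      | cons b u => simp

-- ===== VERDICT (by name: the statement is the Claim_ definition above) =====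
set_option maxHeartbeats 4000000 in
theorem fatigue_keys_for_workout_py_spec : Claim_equal_fatigue_keys_for_workout_py := by
  intro d _
  show fatigue_keys_for_workout_py d = fatigue_keys_for_workout_py_alt d
  simp only [fatigue_keys_for_workout_py, fatigue_keys_for_workout_py_alt, pvFirstMatch,
    List.any_cons, List.any_nil, Bool.or_false, Bool.or_assoc]
  generalize pvFocus d "focus_area" = fa
  generalize pvFocus d "focus_system" = fs
  generalize pvFocus d "focus_attribute" = fat
  rw [show (1:Int) = ((1:Nat):Int) from rfl, PySem.List.slice_to_natCast]
  simp only [apply_ite (List.take 1), apply_ite List.isEmpty,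
    pvDedupLoop_isEmpty, pvDedupLoop_take_one, List.isEmpty_cons,
    List.take_succ_cons, List.take_zero]
  by_cases h1 : fa = "" <;> by_cases h2 : fs = "" <;> by_cases h3 : fat = ""
  · subst h1; subst h2; subst h3; decide
  · subst h1; subst h2
    simp only [ne_eq, not_false_iff, decide_true, h3]
    generalize PySem.Str.isIn "coordination" fat = c9
    generalize (PySem.Str.isIn "speed" fat || PySem.Str.isIn "power" fat) = c10
    generalize PySem.Str.isIn "endurance" fat = c11
    revert c9 c10 c11; decide
  · subst h1; subst h3
    simp only [ne_eq, not_false_iff, decide_true, h2]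
    generalize (PySem.Str.isIn "cardio" fs || PySem.Str.isIn "metabolic" fs) = c7
    generalize PySem.Str.isIn "cns" fs = c8
    revert c7 c8; decide
  · subst h1
    simp only [ne_eq, not_false_iff, decide_true, h2, h3]
    generalize (PySem.Str.isIn "cardio" fs || PySem.Str.isIn "metabolic" fs) = c7
    generalize PySem.Str.isIn "cns" fs = c8
    generalize PySem.Str.isIn "coordination" fat = c9
    generalize (PySem.Str.isIn "speed" fat || PySem.Str.isIn "power" fat) = c10
    generalize PySem.Str.isIn "endurance" fat = c11
    revert c7 c8 c9 c10 c11; decide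
  · subst h2; subst h3
    simp only [ne_eq, not_false_iff, decide_true, h1]
    have hl : PySem.Str.isIn "leg" fa = true →
        (PySem.Str.isIn "leg" fa || (PySem.Str.isIn "squat" fa || PySem.Str.isIn "deadlift" fa)) = true :=
      fun h => by rw [h]; rfl
    have hp : PySem.Str.isIn "push" fa = true →
        (PySem.Str.isIn "push" fa || (PySem.Str.isIn "chest" fa || PySem.Str.isIn "press" fa)) = true :=
      fun h => by rw [h]; rfl
    revert hl hp
    generalize PySem.Str.isIn "leg" fa = l
    generalize PySem.Str.isIn "push" fa = p
    generalize (l || (PySem.Str.isIn "squat" fa || PySem.Str.isIn "deadlift" fa)) = c1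
    generalize (p || (PySem.Str.isIn "chest" fa || PySem.Str.isIn "press" fa)) = c2
    generalize (PySem.Str.isIn "pull" fa || (PySem.Str.isIn "back" fa || PySem.Str.isIn "row" fa)) = c3
    generalize (PySem.Str.isIn "spine" fa || PySem.Str.isIn "back" fa) = c4
    generalize PySem.Str.isIn "hip" fa = c5
    generalize PySem.Str.isIn "shoulder" fa = c6
    revert l p c1 c2 c3 c4 c5 c6; decide
  · subst h2
    simp only [ne_eq, not_false_iff, decide_true, h1, h3]
    have hl : PySem.Str.isIn "leg" fa = true →
        (PySem.Str.isIn "leg" fa || (PySem.Str.isIn "squat" fa || PySem.Str.isIn "deadlift" fa)) = true :=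
      fun h => by rw [h]; rfl
    have hp : PySem.Str.isIn "push" fa = true →
        (PySem.Str.isIn "push" fa || (PySem.Str.isIn "chest" fa || PySem.Str.isIn "press" fa)) = true :=
      fun h => by rw [h]; rfl
    revert hl hp
    generalize PySem.Str.isIn "leg" fa = l
    generalize PySem.Str.isIn "push" fa = p
    generalize (l || (PySem.Str.isIn "squat" fa || PySem.Str.isIn "deadlift" fa)) = c1
    generalize (p || (PySem.Str.isIn "chest" fa || PySem.Str.isIn "press" fa)) = c2
    generalize (PySem.Str.isIn "pull" fa || (PySem.Str.isIn "back" fa || PySem.Str.isIn "row" fa)) = c3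
    generalize (PySem.Str.isIn "spine" fa || PySem.Str.isIn "back" fa) = c4
    generalize PySem.Str.isIn "hip" fa = c5
    generalize PySem.Str.isIn "shoulder" fa = c6
    generalize PySem.Str.isIn "coordination" fat = c9
    generalize (PySem.Str.isIn "speed" fat || PySem.Str.isIn "power" fat) = c10
    generalize PySem.Str.isIn "endurance" fat = c11
    revert l p c1 c2 c3 c4 c5 c6 c9 c10 c11; decide
  · subst h3
    simp only [ne_eq, not_false_iff, decide_true, h1, h2]
    have hl : PySem.Str.isIn "leg" fa = true →
        (PySem.Str.isIn "leg" fa || (PySem.Str.isIn "squat" fa || PySem.Str.isIn "deadlift" fa)) = true :=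
      fun h => by rw [h]; rfl
    have hp : PySem.Str.isIn "push" fa = true →
        (PySem.Str.isIn "push" fa || (PySem.Str.isIn "chest" fa || PySem.Str.isIn "press" fa)) = true :=
      fun h => by rw [h]; rfl
    revert hl hp
    generalize PySem.Str.isIn "leg" fa = l
    generalize PySem.Str.isIn "push" fa = p
    generalize (l || (PySem.Str.isIn "squat" fa || PySem.Str.isIn "deadlift" fa)) = c1
    generalize (p || (PySem.Str.isIn "chest" fa || PySem.Str.isIn "press" fa)) = c2
    generalize (PySem.Str.isIn "pull" fa || (PySem.Str.isIn "back" fa || PySem.Str.isIn "row" fa)) = c3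
    generalize (PySem.Str.isIn "spine" fa || PySem.Str.isIn "back" fa) = c4
    generalize PySem.Str.isIn "hip" fa = c5
    generalize PySem.Str.isIn "shoulder" fa = c6
    generalize (PySem.Str.isIn "cardio" fs || PySem.Str.isIn "metabolic" fs) = c7
    generalize PySem.Str.isIn "cns" fs = c8
    revert l p c1 c2 c3 c4 c5 c6 c7 c8; decide
  · simp only [ne_eq, not_false_iff, decide_true, h1, h2, h3]
    have hl : PySem.Str.isIn "leg" fa = true →
        (PySem.Str.isIn "leg" fa || (PySem.Str.isIn "squat" fa || PySem.Str.isIn "deadlift" fa)) = true :=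
      fun h => by rw [h]; rfl
    have hp : PySem.Str.isIn "push" fa = true →
        (PySem.Str.isIn "push" fa || (PySem.Str.isIn "chest" fa || PySem.Str.isIn "press" fa)) = true :=
      fun h => by rw [h]; rfl
    revert hl hp
    generalize PySem.Str.isIn "leg" fa = l
    generalize PySem.Str.isIn "push" fa = p
    generalize (l || (PySem.Str.isIn "squat" fa || PySem.Str.isIn "deadlift" fa)) = c1
    generalize (p || (PySem.Str.isIn "chest" fa || PySem.Str.isIn "press" fa)) = c2
    generalize (PySem.Str.isIn "pull" fa || (PySem.Str.isIn "back" fa || PySem.Str.isIn "row" fa)) = c3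
    generalize (PySem.Str.isIn "spine" fa || PySem.Str.isIn "back" fa) = c4
    generalize PySem.Str.isIn "hip" fa = c5
    generalize PySem.Str.isIn "shoulder" fa = c6
    generalize (PySem.Str.isIn "cardio" fs || PySem.Str.isIn "metabolic" fs) = c7
    generalize PySem.Str.isIn "cns" fs = c8
    generalize PySem.Str.isIn "coordination" fat = c9
    generalize (PySem.Str.isIn "speed" fat || PySem.Str.isIn "power" fat) = c10
    generalize PySem.Str.isIn "endurance" fat = c11
    revert l p c1 c2 c3 c4 c5 c6 c7 c8 c9 c10 c11; decide
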